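-- pv_equiv track=rewrite | github.com/walgoguma/CodingTest | 프로그래머스/2/138476. 귤 고르기/귤 고르기.py | solution
-- ===== SOURCE A (Python) =====
-- def solution(k, tangerine):
--     answer = 0
--     dic = {}
--
--     #1. 크기별 개수 dictionary로 저장
--     for x in tangerine:
--         if dic.get(x):
--             dic[x] += 1
--         else:
--             dic[x] = 1
--
--     #2. 개수별로 dictionary 정렬
--     sorted_dict = dict(sorted(dic.items(), key= lambda x:x[1], reverse=True))
--
--     #3. 개수가 많은 귤은 먼저 택하되 그 개수가 팔려고 하는 개수보다 크거나 같으면 종료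
--     count = 0
--     for x in sorted_dict.values():
--         count += x
--         answer += 1
--
--         if count >= k:
--             break
--
--
--
--     return answer
-- ===== SOURCE B (Python) =====
-- def solution(k, tangerine):
--     # Bucket (counting-sort) scan over frequencies instead of a comparison sort.
--     freq = {}
--     for x in tangerine:
--         freq[x] = freq.get(x, 0) + 1
--     buckets = {}
--     maxc = 0
--     for c in freq.values():
--         buckets[c] = buckets.get(c, 0) + 1
--         if c > maxc:
--             maxc = c
--     total = 0
--     answer = 0
--     for c in range(maxc, 0, -1):
--         for _ in range(buckets.get(c, 0)):
--             total += c
--             answer += 1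
--             if total >= k:
--                 return answer
--     return answer
-- ===== Notes on version B (the rewrite author's own statement) =====
-- stated objective: alternative
-- what changed: Replaces A's comparison sort of the size frequencies by a bucket table indexed by frequency (count of sizes per frequency plus running maximum) scanned from the maximum frequency downwards, accumulating per size with an early return once the running total reaches k.
import Mathlib
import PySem

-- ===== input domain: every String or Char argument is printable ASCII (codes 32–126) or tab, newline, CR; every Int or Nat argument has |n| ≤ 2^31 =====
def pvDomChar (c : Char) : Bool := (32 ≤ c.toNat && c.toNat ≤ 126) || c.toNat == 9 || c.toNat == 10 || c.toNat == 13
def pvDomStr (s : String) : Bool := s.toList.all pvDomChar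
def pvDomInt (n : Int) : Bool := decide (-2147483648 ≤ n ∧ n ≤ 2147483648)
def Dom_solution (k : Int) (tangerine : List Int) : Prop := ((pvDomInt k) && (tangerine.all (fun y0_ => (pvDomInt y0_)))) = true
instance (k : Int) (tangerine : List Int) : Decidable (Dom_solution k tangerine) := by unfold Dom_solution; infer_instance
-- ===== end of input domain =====

-- B replaces A's comparison sort of the frequency values by a bucket table scanned from the
-- maximum frequency downwards (counting-sort style); objective: alternative algorithm.

-- ===== PORT A =====
-- 'for x in sorted_dict.values(): count += x; answer += 1; if count >= k: break'
def solLoopA (k : Int) : List Int → Int → Int → Int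
  | [], _, answer => answer
  | x :: rest, count, answer =>
    let count' := count + x
    let answer' := answer + 1
    if count' ≥ k then answer' else solLoopA k rest count' answer'

def solution (k : Int) (tangerine : List Int) : Int :=
  let dic := tangerine.foldl (fun d x =>
    match d.get? x with                          -- 'if dic.get(x):' (truthiness of the count)
    | some v => if v ≠ 0 then d.insert x (v + 1) else d.insert x 1
    | none => d.insert x 1) PySem.Dict.empty
  let sortedDict := PySem.Dict.ofList (PySem.List.sorted dic.items (fun p => p.2) true)
  solLoopA k sortedDict.values 0 0

-- ===== PORT B =====
-- 'for _ in range(buckets.get(c, 0)): total += c; answer += 1; if total >= k: return answer'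
def solInnerB (k : Int) (c : Int) : Nat → Int → Int → Sum Int (Int × Int)
  | 0, total, answer => .inr (total, answer)
  | n + 1, total, answer =>
    let total' := total + c
    let answer' := answer + 1
    if total' ≥ k then .inl answer' else solInnerB k c n total' answer'

-- 'for c in range(maxc, 0, -1): …'
def solOuterB (k : Int) (buckets : PySem.Dict Int Int) : List Int → Int → Int → Int
  | [], _, answer => answer
  | c :: cs, total, answer =>
    match solInnerB k c (buckets.getD c 0).toNat total answer with
    | .inl ans => ans
    | .inr (total', answer') => solOuterB k buckets cs total' answer'

def solution_alt (k : Int) (tangerine : List Int) : Int :=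
  let freq := tangerine.foldl (fun d x => d.insert x (d.getD x 0 + 1)) PySem.Dict.empty
  let bm := freq.values.foldl
    (fun (p : PySem.Dict Int Int × Int) c =>
      (p.1.insert c (p.1.getD c 0 + 1), if c > p.2 then c else p.2))
    (PySem.Dict.empty, 0)
  solOuterB k bm.1 (PySem.List.pyRange bm.2 0 (-1)) 0 0

-- ===== PRECONDITION & SPEC =====
def Spec_solution (k : Int) (tangerine : List Int) (out : Int) : Prop := out = solution_alt k tangerine
instance (k : Int) (tangerine : List Int) (out : Int) : Decidable (Spec_solution k tangerine out) := by unfold Spec_solution; infer_instance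

-- ===== CLAIM (what is proved, stated in full; the proofs are below) =====
def Claim_equal_solution : Prop := ∀ (k : Int) (tangerine : List Int), Dom_solution k tangerine → Spec_solution k tangerine (solution k tangerine)

-- ===== LEMMAS AND PROOFS =====

-- A's counting loop builds Counter(tangerine).
lemma solDicA_eq_counter_aux (xs : List Int) :
    ∀ (d : PySem.Dict Int Int), (∀ key v, d.get? key = some v → 1 ≤ v) →
    xs.foldl (fun d x =>
      match d.get? x with
      | some v => if v ≠ 0 then d.insert x (v + 1) else d.insert x 1
      | none => d.insert x 1) d
    = xs.foldl (fun d x => d.insert x (d.getD x 0 + 1)) d := by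
  induction xs with
  | nil => intro d _; rfl
  | cons x xs ih =>
    intro d hd
    have hstep :
        (match d.get? x with
          | some v => if v ≠ 0 then d.insert x (v + 1) else d.insert x 1
          | none => d.insert x 1)
        = d.insert x (d.getD x 0 + 1) := by
      cases h : d.get? x with
      | none => simp [PySem.Dict.getD, h]
      | some v =>
        have hv := hd x v h
        have : v ≠ 0 := by omega
        simp [PySem.Dict.getD, h, this]
    have hinv : ∀ key v, (d.insert x (d.getD x 0 + 1)).get? key = some v → 1 ≤ v := by
      intro key v hget
      by_cases hk : key = x
      · subst hk
        rw [PySem.Dict.get?_insert_self] at hget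
        cases h : d.get? key with
        | none => simp [PySem.Dict.getD, h] at hget; omega
        | some w =>
          have := hd key w h
          simp [PySem.Dict.getD, h] at hget
          omega
      · rw [PySem.Dict.get?_insert_of_ne _ _ hk] at hget
        exact hd key v hget
    simp only [List.foldl_cons, hstep]
    exact ih _ hinv

lemma solDicA_eq_counter (xs : List Int) :
    xs.foldl (fun d x =>
      match d.get? x with
      | some v => if v ≠ 0 then d.insert x (v + 1) else d.insert x 1
      | none => d.insert x 1) (PySem.Dict.empty : PySem.Dict Int Int)
    = PySem.Dict.counter xs := by
  rw [solDicA_eq_counter_aux]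
  · exact PySem.Dict.foldl_insert_getD_add_one_eq_counter xs
  · intro key v h
    simp [PySem.Dict.get?_empty] at h

-- values of dict(ps) for ps with pairwise-distinct keys.
lemma values_ofList_of_nodup_keys (ps : List (Int × Int)) (h : (ps.map Prod.fst).Nodup) :
    (PySem.Dict.ofList ps).values = ps.map Prod.snd := by
  have hfresh : ∀ p ∈ ps, (PySem.Dict.empty : PySem.Dict Int Int).contains p.1 = false := by
    intro p _; simp [PySem.Dict.contains_empty]
  have := PySem.Dict.items_foldl_insert_fresh (l := ps) (k := Prod.fst) (v := Prod.snd)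
    (d := PySem.Dict.empty) hfresh h
  have hitems : (PySem.Dict.ofList ps).items = ps := by
    simpa [PySem.Dict.ofList, PySem.Dict.update, PySem.Dict.empty] using this
  simp [PySem.Dict.values, hitems]

-- the pair fold in B splits into its two component folds
lemma solPairFold (V : List Int) :
    ∀ (d : PySem.Dict Int Int) (m : Int),
    V.foldl (fun (p : PySem.Dict Int Int × Int) c =>
        (p.1.insert c (p.1.getD c 0 + 1), if c > p.2 then c else p.2)) (d, m)
    = (V.foldl (fun d c => d.insert c (d.getD c 0 + 1)) d,
       V.foldl (fun m c => if c > m then c else m) m) := by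
  induction V with
  | nil => intro d m; rfl
  | cons c V ih => intro d m; simp only [List.foldl_cons]; exact ih _ _

lemma solMaxFold_le (V : List Int) :
    ∀ (m : Int), m ≤ V.foldl (fun m c => if c > m then c else m) m ∧
      ∀ v ∈ V, v ≤ V.foldl (fun m c => if c > m then c else m) m := by
  induction V with
  | nil => intro m; simp
  | cons c V ih =>
    intro m
    simp only [List.foldl_cons]
    by_cases hcm : c > m
    · simp only [if_pos hcm]
      obtain ⟨h1, h2⟩ := ih c
      refine ⟨by omega, ?_⟩
      intro v hv
      rcases List.mem_cons.mp hv with rfl | hv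
      · omega
      · exact h2 v hv
    · simp only [if_neg hcm]
      obtain ⟨h1, h2⟩ := ih m
      refine ⟨h1, ?_⟩
      intro v hv
      rcases List.mem_cons.mp hv with rfl | hv
      · omega
      · exact h2 v hv

-- loopA over a block of n copies of c is the inner loop of B
lemma solLoopA_replicate (k c : Int) :
    ∀ (n : Nat) (rest : List Int) (total answer : Int),
    solLoopA k (List.replicate n c ++ rest) total answer
      = (match solInnerB k c n total answer with
          | .inl ans => ans
          | .inr (t, a) => solLoopA k rest t a) := by
  intro n
  induction n with
  | zero => intro rest total answer; rfl
  | succ n ih =>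
    intro rest total answer
    simp only [List.replicate_succ, List.cons_append, solLoopA, solInnerB]
    by_cases h : total + c ≥ k
    · simp [h]
    · simp [h, ih]

-- B's outer loop is A's loop over the flattened bucket list
lemma solOuterB_eq_loopA (k : Int) (buckets : PySem.Dict Int Int) :
    ∀ (cs : List Int) (total answer : Int),
    solOuterB k buckets cs total answer
      = solLoopA k (cs.flatMap (fun c => List.replicate (buckets.getD c 0).toNat c)) total answer := by
  intro cs
  induction cs with
  | nil => intro total answer; rfl
  | cons c cs ih =>
    intro total answer
    rw [List.flatMap_cons, solLoopA_replicate]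
    simp only [solOuterB]
    cases h : solInnerB k c (buckets.getD c 0).toNat total answer with
    | inl ans => rfl
    | inr p => obtain ⟨t, a⟩ := p; exact ih t a

lemma count_flatMap_replicate (g : Int → Nat) (a : Int) :
    ∀ (cs : List Int), cs.Nodup →
    (cs.flatMap (fun c => List.replicate (g c) c)).count a = if a ∈ cs then g a else 0 := by
  intro cs
  induction cs with
  | nil => intro _; simp
  | cons c cs ih =>
    intro hnd
    obtain ⟨hc, hnd'⟩ := List.nodup_cons.mp hnd
    rw [List.flatMap_cons, List.count_append, ih hnd', List.count_replicate]
    by_cases hac : a = c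
    · subst hac
      have : a ∉ cs := hc
      simp [this]
    · have : (c == a) = false := by simp [Ne.symm hac]
      simp [this, hac]

lemma pairwise_ge_flatMap_replicate (g : Int → Nat) :
    ∀ (cs : List Int), cs.Pairwise (fun a b => b < a) →
    (cs.flatMap (fun c => List.replicate (g c) c)).Pairwise (fun a b => b ≤ a) := by
  intro cs
  induction cs with
  | nil => intro _; simp
  | cons c cs ih =>
    intro hp
    obtain ⟨hc, hp'⟩ := List.pairwise_cons.mp hp
    rw [List.flatMap_cons]
    apply List.pairwise_append.mpr
    refine ⟨?_, ih hp', ?_⟩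
    · apply List.pairwise_replicate.mpr
      right; exact le_refl c
    · intro x hx y hy
      have hxc : x = c := List.eq_of_mem_replicate hx
      obtain ⟨cc, hcc, hy'⟩ := List.mem_flatMap.mp hy
      have hyc : y = cc := List.eq_of_mem_replicate hy'
      have := hc cc hcc
      omega

-- strict descent of range(maxc, 0, -1)
lemma pairwise_gt_pyRange_neg_one (a b : Int) :
    (PySem.List.pyRange a b (-1)).Pairwise (fun x y => y < x) := by
  rw [PySem.List.pyRange_neg_one_eq_reverse]
  rw [List.pairwise_reverse]
  exact PySem.List.pairwise_lt_pyRange_one _ _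

-- every value of Counter(xs) is a positive count
lemma mem_values_counter_pos (xs : List Int) (v : Int) (hv : v ∈ (PySem.Dict.counter xs).values) :
    1 ≤ v := by
  simp only [PySem.Dict.values, PySem.Dict.items_counter, List.map_map, List.mem_map] at hv
  obtain ⟨key, hk, hkv⟩ := hv
  have hmem : key ∈ xs := (PySem.Set.mem_ofList _ _).mp hk
  have : 0 < xs.count key := List.count_pos_iff.mpr hmem
  simp only [Function.comp] at hkv
  omega

-- MAIN: the two list-of-counts agree, hence the two loops agree.
theorem solution_eq (k : Int) (tangerine : List Int) :
    solution k tangerine = solution_alt k tangerine := by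
  unfold solution solution_alt
  simp only [solDicA_eq_counter, PySem.Dict.foldl_insert_getD_add_one_eq_counter, solPairFold,
    solOuterB_eq_loopA]
  set V := (PySem.Dict.counter tangerine).values with hV
  set maxc := V.foldl (fun m c => if c > m then c else m) 0 with hmaxc
  -- the two value lists
  set ps := PySem.List.sorted (PySem.Dict.counter tangerine).items (fun p => p.2) true with hps
  have hperm : ps.Perm (PySem.Dict.counter tangerine).items := PySem.List.sorted_perm _ _ _
  have hkeysnd : (ps.map Prod.fst).Nodup := by
    refine ((hperm.map Prod.fst).symm).nodup ?_
    have : ((PySem.Dict.counter tangerine).items.map Prod.fst) = (PySem.Dict.counter tangerine).keys := rfl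
    rw [this, PySem.Dict.keys_counter]
    exact PySem.Set.nodup_ofList _
  rw [values_ofList_of_nodup_keys ps hkeysnd]
  set LA := ps.map Prod.snd with hLA
  set LB := (PySem.List.pyRange maxc 0 (-1)).flatMap
      (fun c => List.replicate ((PySem.Dict.counter V).getD c 0).toNat c) with hLB
  suffices hAB : LA = LB by rw [hAB]
  -- both lists are sorted descending and permutations of V, hence equal
  have hLAperm : LA.Perm V := by
    have : (PySem.Dict.counter tangerine).items.map Prod.snd = V := rfl
    rw [hLA, ← this]
    exact hperm.map Prod.snd
  have hrange_nodup : (PySem.List.pyRange maxc 0 (-1)).Nodup :=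
    (pairwise_gt_pyRange_neg_one maxc 0).imp (fun h => by omega)
  have hcount : ∀ a : Int, LB.count a = V.count a := by
    intro a
    rw [hLB, count_flatMap_replicate _ _ _ hrange_nodup]
    by_cases hmem : a ∈ PySem.List.pyRange maxc 0 (-1)
    · simp [hmem, PySem.Dict.getD_counter]
    · have haV : a ∉ V := by
        intro haV
        apply hmem
        rw [PySem.List.mem_pyRange_neg_one]
        have h1 := mem_values_counter_pos tangerine a haV
        have h2 := (solMaxFold_le V 0).2 a haV
        exact ⟨by omega, h2⟩
      simp [hmem, List.count_eq_zero.mpr haV]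
  have hLBperm : LB.Perm V := List.perm_iff_count.mpr (fun a => by rw [hcount])
  have hLAsorted : LA.Pairwise (fun a b => b ≤ a) := by
    rw [hLA]
    exact List.Pairwise.map _ (fun a b h => h) (PySem.List.sorted_pairwise_rev _ _)
  have hLBsorted : LB.Pairwise (fun a b => b ≤ a) :=
    pairwise_ge_flatMap_replicate _ _ (pairwise_gt_pyRange_neg_one maxc 0)
  exact (hLAperm.trans hLBperm.symm).eq_of_pairwise (fun a b _ _ h1 h2 => by omega)
    hLAsorted hLBsorted

-- ===== VERDICT (by name: the statement is the Claim_ definition above) =====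
theorem solution_spec : Claim_equal_solution := by
  intro k tangerine _
  unfold Spec_solution
  exact solution_eq k tangerine
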